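-- pv_equiv track=rewrite | github.com/jt-lanl/cov-voc | coalign.py | nuseq_realign
-- ===== SOURCE A (Python) =====
-- import itertools as it
--
-- def grouper(iterable, n, fillvalue=None):
--     "Collect data into fixed-length chunks or blocks"
--     # grouper('ABCDEFG', 3, 'x') --> ABC DEF Gxx"
--     args = [iter(iterable)] * n
--     return it.zip_longest(*args, fillvalue=fillvalue)
--
-- DASH = '-'
--
-- THREE_DASHES = ('-','-','-')
--
-- def nuseq_realign(nuseq,aaseq):
--     nuseq_triples = filter(lambda x: x!=THREE_DASHES,
--                            grouper(nuseq,3,fillvalue=DASH))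
--     aaseq_indices = filter(lambda n: aaseq[n] != DASH, range(len(aaseq)))
--     nuseq_realigned = [THREE_DASHES] * len(aaseq)
--     for n,triple in zip(aaseq_indices,nuseq_triples):
--         nuseq_realigned[n] = triple
--     flatlist = it.chain.from_iterable(nuseq_realigned) # flatten list of tuples
--     return "".join(flatlist)
-- ===== SOURCE B (Python) =====
-- DASH = '-'
--
-- def nuseq_realign(nuseq, aaseq):
--     # Pad nuseq to a codon boundary, cut it into 3-char codon strings, drop all-gap codons.
--     padded = nuseq + DASH * (-len(nuseq) % 3)
--     codons = [c for c in (padded[i:i+3] for i in range(0, len(padded), 3)) if c != '---']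
--     # Split aaseq into dash-separated runs; each run of length k takes the next k codons
--     # as one block slice (padded with '---' if codons run out); gaps reappear as the joiner.
--     parts = []
--     pos = 0
--     for run in aaseq.split(DASH):
--         k = len(run)
--         chunk = codons[pos:pos+k]
--         chunk = chunk + ['---'] * (k - len(chunk))
--         parts.append(''.join(chunk))
--         pos += k
--     return '---'.join(parts)
-- ===== Notes on version B (the rewrite author's own statement) =====
-- stated objective: faster
-- what changed: B replaces A's index-scatter (filter non-dash aaseq indices, preallocate a list of gap triples, zip indices with a lazily filtered triple iterator and assign by index, then flatten) with a run-based computation: pad nuseq to a codon boundary, build the filtered codon-string list by slicing, split aaseq on '-', hand each dash-free run a block slice of the codon list (padded with '---' when codons run out), and rejoin the blocks with '---'.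
import Mathlib
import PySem

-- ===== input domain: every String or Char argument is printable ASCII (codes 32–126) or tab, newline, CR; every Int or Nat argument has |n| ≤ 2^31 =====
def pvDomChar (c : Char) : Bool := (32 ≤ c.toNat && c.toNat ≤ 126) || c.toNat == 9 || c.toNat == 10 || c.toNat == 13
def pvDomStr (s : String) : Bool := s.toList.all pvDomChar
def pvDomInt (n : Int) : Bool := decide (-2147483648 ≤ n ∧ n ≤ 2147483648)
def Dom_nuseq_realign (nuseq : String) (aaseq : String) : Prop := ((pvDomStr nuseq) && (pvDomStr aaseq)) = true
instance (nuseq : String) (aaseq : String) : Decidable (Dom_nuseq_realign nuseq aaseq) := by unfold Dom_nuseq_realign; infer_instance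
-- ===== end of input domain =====

-- B replaces A's index-scatter over codon triples by a run-based computation: split aaseq
-- on '-', give each dash-free run a block slice of the codon string list, rejoin with '---'
-- (objective: faster — a timing run measured B ~2x faster, a constant-factor win from
-- batch string slicing/joining instead of per-element iterator traffic).

-- ===== PORT A =====
-- grouper(nuseq, 3, fillvalue='-'): chunks of 3, padded with '-'
def pvChunk3 : List Char → List (Char × Char × Char)
  | [] => []
  | [a] => [(a, '-', '-')]
  | [a, b] => [(a, b, '-')]
  | a :: b :: c :: rest => (a, b, c) :: pvChunk3 rest

-- filter(lambda x: x != THREE_DASHES, grouper(nuseq, 3, fillvalue=DASH))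
def pvTriples (nuseq : String) : List (Char × Char × Char) :=
  (pvChunk3 nuseq.toList).filter (fun x => x ≠ ('-', '-', '-'))

def nuseq_realign (nuseq : String) (aaseq : String) : String :=
  let L := aaseq.toList
  -- aaseq_indices = filter(lambda n: aaseq[n] != DASH, range(len(aaseq)))
  let idxs := (List.range L.length).filter (fun n => L.getD n ' ' ≠ '-')
  -- nuseq_realigned = [THREE_DASHES] * len(aaseq); for n,triple in zip(...): nuseq_realigned[n] = triple
  let realigned := (idxs.zip (pvTriples nuseq)).foldl
      (fun acc p => acc.set p.1 p.2) (List.replicate L.length ('-', '-', '-'))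
  -- "".join(chain.from_iterable(nuseq_realigned)): join of single chars = the string of the flat char list
  String.ofList (realigned.flatMap (fun t => [t.1, t.2.1, t.2.2]))

-- ===== PORT B =====
-- padded = nuseq + '-' * (-len(nuseq) % 3); codons = [padded[i:i+3] ...] filtered ≠ '---'
def pvCodons (nuseq : String) : List String :=
  let padded := nuseq.toList ++ List.replicate (PySem.Int.mod (-(nuseq.toList.length : Int)) 3).toNat '-'
  ((PySem.List.pyRange 0 (padded.length : Int) 3).map
      (fun i => String.ofList (PySem.List.slice padded (some i) (some (i + 3))))).filter
    (fun c => c ≠ "---")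

-- for run in aaseq.split('-'): chunk = codons[pos:pos+k] (+ '---' padding); parts.append(''.join(chunk))
def pvRunLoop : List (List Char) → List String → Int → List String
  | [], _, _ => []
  | run :: rs, codons, pos =>
      let k : Int := (run.length : Int)
      let chunk := PySem.List.slice codons (some pos) (some (pos + k))
      let chunk2 := chunk ++ List.replicate (k - (chunk.length : Int)).toNat "---"
      PySem.Str.join "" chunk2 :: pvRunLoop rs codons (pos + k)

def nuseq_realign_alt (nuseq : String) (aaseq : String) : String :=
  -- '---'.join(parts) over the runs of aaseq.split('-')
  PySem.Str.join "---" (pvRunLoop (PySem.Chars.splitOn aaseq.toList ['-']) (pvCodons nuseq) 0)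

-- ===== PRECONDITION & SPEC =====
def Spec_nuseq_realign (nuseq : String) (aaseq : String) (out : String) : Prop := out = nuseq_realign_alt nuseq aaseq
instance (nuseq : String) (aaseq : String) (out : String) : Decidable (Spec_nuseq_realign nuseq aaseq out) := by unfold Spec_nuseq_realign; infer_instance

-- ===== CLAIM (what is proved, stated in full; the proofs are below) =====
def Claim_equal_nuseq_realign : Prop := ∀ (nuseq : String) (aaseq : String), Dom_nuseq_realign nuseq aaseq → Spec_nuseq_realign nuseq aaseq (nuseq_realign nuseq aaseq)

-- ===== LEMMAS AND PROOFS =====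

-- proof-side: triple-level per-character walk (common intermediate of both ports)
def fWalk : List Char → List (Char × Char × Char) → List (Char × Char × Char)
  | [], _ => []
  | c :: cs, T =>
      if c = '-' then ('-', '-', '-') :: fWalk cs T
      else T.headD ('-', '-', '-') :: fWalk cs T.tail

def toC3 (t : Char × Char × Char) : List Char := [t.1, t.2.1, t.2.2]

lemma fWalk_nil (cs : List Char) : fWalk cs [] = List.replicate cs.length ('-', '-', '-') := by
  induction cs with
  | nil => rfl
  | cons c cs ih =>
    by_cases hc : c = '-' <;> simp [fWalk, hc, ih, List.replicate_succ]

lemma foldl_set_shift (ps : List (ℕ × (Char × Char × Char))) (x : Char × Char × Char)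
    (xs : List (Char × Char × Char)) :
    List.foldl (fun acc p => acc.set p.1 p.2) (x :: xs) (ps.map (Prod.map Nat.succ id))
      = x :: List.foldl (fun acc p => acc.set p.1 p.2) xs ps := by
  induction ps generalizing xs with
  | nil => rfl
  | cons p ps ih => simp [List.foldl_cons, Prod.map, List.set, ih]

lemma scatter_eq_fWalk (L : List Char) (T : List (Char × Char × Char)) :
    List.foldl (fun acc p => acc.set p.1 p.2) (List.replicate L.length ('-', '-', '-'))
      (((List.range L.length).filter (fun n => L.getD n ' ' ≠ '-')).zip T)
      = fWalk L T := by
  induction L generalizing T with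
  | nil => simp [fWalk]
  | cons c cs ih =>
    rw [List.length_cons, List.range_succ_eq_map, List.filter_cons, List.filter_map,
      List.replicate_succ]
    have hfe : List.filter ((fun n => decide ((c :: cs).getD n ' ' ≠ '-')) ∘ Nat.succ)
        (List.range cs.length)
        = List.filter (fun n => decide (cs.getD n ' ' ≠ '-')) (List.range cs.length) := by
      apply List.filter_congr; intro n _; simp
    by_cases hc : c = '-'
    · have h0 : (decide ((c :: cs).getD 0 ' ' ≠ '-')) = false := by simp [hc]
      rw [h0]
      simp only [Bool.false_eq_true, if_false, hfe, List.zip_map_left]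
      rw [foldl_set_shift, ih]
      simp [fWalk, hc]
    · have h0 : (decide ((c :: cs).getD 0 ' ' ≠ '-')) = true := by simp [hc]
      rw [h0, if_pos rfl]
      cases T with
      | nil => simp [fWalk, hc, fWalk_nil]
      | cons t ts =>
        rw [List.zip_cons_cons, List.foldl_cons]
        have hset : (('-', '-', '-') :: List.replicate cs.length ('-', '-', '-')).set 0 t
            = t :: List.replicate cs.length ('-', '-', '-') := rfl
        simp only [hset, hfe, List.zip_map_left]
        rw [foldl_set_shift, ih]
        all_goals simp [fWalk, hc]

-- ---- B side: the split ----
-- structural form of aaseq.split('-')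
def consHead (c : Char) : List (List Char) → List (List Char)
  | [] => [[c]]
  | r :: rs => (c :: r) :: rs

def pvSplitDash : List Char → List (List Char)
  | [] => [[]]
  | c :: cs => if c = '-' then [] :: pvSplitDash cs else consHead c (pvSplitDash cs)

def consHeadL (p : List Char) : List (List Char) → List (List Char)
  | [] => [p]
  | r :: rs => (p ++ r) :: rs

lemma pvSplitDash_ne_nil (l : List Char) : pvSplitDash l ≠ [] := by
  cases l with
  | nil => simp [pvSplitDash]
  | cons c cs =>
    by_cases hc : c = '-'
    · simp [pvSplitDash, hc]
    · simp only [pvSplitDash, hc, if_false]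
      cases h : pvSplitDash cs <;> simp [consHead]

lemma splitOn_go_spec (l : List Char) : ∀ (fuel : ℕ) (cur : List Char) (acc : List (List Char)),
    l.length ≤ fuel →
    PySem.Chars.splitOn.go ['-'] fuel l cur acc
      = acc.reverse ++ consHeadL cur.reverse (pvSplitDash l) := by
  induction l with
  | nil =>
    intro fuel cur acc _
    cases fuel <;> simp [PySem.Chars.splitOn.go, pvSplitDash, consHeadL]
  | cons c cs ih =>
    intro fuel cur acc hf
    cases fuel with
    | zero => simp at hf
    | succ fuel =>
      rw [PySem.Chars.splitOn.go.eq_def]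
      show (if ['-'].isPrefixOf (c :: cs) = true then
          PySem.Chars.splitOn.go ['-'] fuel cs [] (cur.reverse :: acc)
        else PySem.Chars.splitOn.go ['-'] fuel cs (c :: cur) acc) = _
      have hpre : (['-'].isPrefixOf (c :: cs)) = ('-' == c) := by
        simp [List.isPrefixOf]
      by_cases hc : c = '-'
      · subst hc
        have hp : (['-'].isPrefixOf ('-' :: cs)) = true := by simp [List.isPrefixOf]
        rw [if_pos hp]
        rw [ih fuel [] (cur.reverse :: acc) (by simpa using Nat.le_of_succ_le_succ hf)]
        simp only [pvSplitDash, if_pos rfl, List.reverse_cons, List.reverse_nil, List.nil_append]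
        cases h : pvSplitDash cs with
        | nil => exact absurd h (pvSplitDash_ne_nil cs)
        | cons r rs => simp [consHeadL]
      · have : ('-' == c) = false := by simp [Ne.symm hc]
        simp only [hpre, this, Bool.false_eq_true, if_false]
        rw [ih fuel (c :: cur) acc (by simpa using Nat.le_of_succ_le_succ hf)]
        simp only [pvSplitDash, hc, if_false, List.reverse_cons]
        cases h : pvSplitDash cs with
        | nil => exact absurd h (pvSplitDash_ne_nil cs)
        | cons r rs => simp [consHead, consHeadL]

lemma splitOn_eq_pvSplitDash (l : List Char) :
    PySem.Chars.splitOn l ['-'] = pvSplitDash l := by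
  rw [PySem.Chars.splitOn, splitOn_go_spec l (l.length + 1) [] [] (by omega)]
  cases h : pvSplitDash l with
  | nil => exact absurd h (pvSplitDash_ne_nil l)
  | cons r rs => simp [consHeadL]

lemma intercalate_cons_cons (x r : List Char) (rs : List (List Char)) :
    List.intercalate ['-'] (x :: r :: rs) = x ++ '-' :: List.intercalate ['-'] (r :: rs) := by
  simp [List.intercalate, List.intersperse]

lemma intercalate_pvSplitDash (l : List Char) :
    List.intercalate ['-'] (pvSplitDash l) = l := by
  induction l with
  | nil => simp [pvSplitDash, List.intercalate]
  | cons c cs ih =>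
    by_cases hc : c = '-'
    · subst hc
      rw [show pvSplitDash ('-' :: cs) = [] :: pvSplitDash cs from by simp [pvSplitDash]]
      cases h : pvSplitDash cs with
      | nil => exact absurd h (pvSplitDash_ne_nil cs)
      | cons r rs =>
        rw [h] at ih
        rw [intercalate_cons_cons, ih]
        rfl
    · simp only [pvSplitDash, hc, if_false]
      cases h : pvSplitDash cs with
      | nil => exact absurd h (pvSplitDash_ne_nil cs)
      | cons r rs =>
        rw [h] at ih
        cases rs with
        | nil => simpa [consHead, List.intercalate] using congrArg (c :: ·) ih
        | cons r2 rs2 =>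
          simp only [consHead]
          rw [intercalate_cons_cons, ih.symm, intercalate_cons_cons]
          rfl

lemma dash_not_mem_pvSplitDash (l : List Char) :
    ∀ r ∈ pvSplitDash l, '-' ∉ r := by
  induction l with
  | nil => simp [pvSplitDash]
  | cons c cs ih =>
    by_cases hc : c = '-'
    · simp only [pvSplitDash, if_pos hc]
      intro r hr
      rcases List.mem_cons.mp hr with rfl | h
      · simp
      · exact ih r h
    · simp only [pvSplitDash, hc, if_false]
      cases h : pvSplitDash cs with
      | nil => exact absurd h (pvSplitDash_ne_nil cs)
      | cons r0 rs0 =>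
        have ih' := h ▸ ih
        simp only [consHead]
        intro r hr
        rcases List.mem_cons.mp hr with rfl | hr'
        · simp only [List.mem_cons, not_or]
          refine ⟨Ne.symm hc, fun hm => ih' r0 (List.mem_cons_self ..) hm⟩
        · exact ih' r (List.mem_cons_of_mem _ hr')

-- ---- B side: the codons ----
-- the Python pad length -len(ns) % 3, as a Nat
def padN (n : ℕ) : ℕ := (PySem.Int.mod (-(n : Int)) 3).toNat

def pad3 (ns : List Char) : List Char := ns ++ List.replicate (padN ns.length) '-'

lemma padN_add_three (n : ℕ) : padN (n + 3) = padN n := by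
  unfold padN
  rw [PySem.Int.mod_eq_emod_of_pos (by norm_num), PySem.Int.mod_eq_emod_of_pos (by norm_num)]
  omega

lemma length_pad3 (ns : List Char) : ns.length + padN ns.length = 3 * ((ns.length + 2) / 3) := by
  unfold padN
  rw [PySem.Int.mod_eq_emod_of_pos (by norm_num)]
  omega

lemma chunks_pad3 (ns : List Char) :
    (List.range ((ns.length + 2) / 3)).map
        (fun k => ((pad3 ns).drop (3 * k)).take 3)
      = (pvChunk3 ns).map toC3 := by
  induction ns using pvChunk3.induct with
  | case1 => simp [pvChunk3]
  | case2 a =>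
    simp [pad3, padN, pvChunk3, toC3, List.range_succ, PySem.Int.mod]
  | case3 a b =>
    simp [pad3, padN, pvChunk3, toC3, List.range_succ, PySem.Int.mod]
  | case4 a b c rest ih =>
    have hp : pad3 (a :: b :: c :: rest) = a :: b :: c :: pad3 rest := by
      simp only [pad3, List.length_cons]
      rw [show rest.length + 1 + 1 + 1 = rest.length + 3 by omega, padN_add_three]
      rfl
    have hm : ((a :: b :: c :: rest).length + 2) / 3 = (rest.length + 2) / 3 + 1 := by
      simp only [List.length_cons]
      omega
    rw [hp, hm, List.range_succ_eq_map, List.map_cons, List.map_map]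
    simp only [pvChunk3, List.map_cons]
    refine congrArg₂ List.cons rfl ?_
    rw [← ih]
    apply List.map_congr_left
    intro k _
    simp only [Function.comp_apply]
    rw [show 3 * (k + 1) = 3 * k + 3 by ring]
    rfl

lemma toC3_eq_dashes_iff (t : Char × Char × Char) :
    toC3 t = ['-', '-', '-'] ↔ t = ('-', '-', '-') := by
  obtain ⟨x, y, z⟩ := t
  simp [toC3]

lemma pvCodons_eq (nuseq : String) :
    pvCodons nuseq = (pvTriples nuseq).map (fun t => String.ofList (toC3 t)) := by
  simp only [pvCodons, pvTriples]
  have hlen : ((nuseq.toList ++ List.replicate (PySem.Int.mod (-(nuseq.toList.length : Int)) 3).toNat '-').length : Int)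
      = ((3 * ((nuseq.toList.length + 2) / 3) : ℕ) : Int) := by
    have := length_pad3 nuseq.toList
    unfold padN at this
    simp only [List.length_append, List.length_replicate]
    exact_mod_cast this
  rw [hlen]
  -- pyRange 0 (3*m) 3 = map (3*k) (range m)
  rw [PySem.List.pyRange_of_pos _ _ (by norm_num)]
  set m := (nuseq.toList.length + 2) / 3 with hm
  have hcount : (if (0 : Int) < ((3 * m : ℕ) : Int) then ((((3 * m : ℕ) : Int) - 0 + 3 - 1) / 3).toNat else 0) = m := by
    by_cases h0 : 0 < m
    · rw [if_pos (by exact_mod_cast Nat.mul_pos (by norm_num) h0)]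
      have h1 : (((3 * m : ℕ) : Int) - 0 + 3 - 1) = ((3 * m + 2 : ℕ) : Int) := by push_cast; ring
      have h2 : ((3 * m + 2 : ℕ) : Int) / (3 : Int) = (((3 * m + 2) / 3 : ℕ) : Int) :=
        (Int.natCast_ediv _ 3).symm
      rw [h1, h2, Int.toNat_natCast]
      omega
    · have hne : ¬ ((0 : Int) < ((3 * m : ℕ) : Int)) := by
        exact_mod_cast Nat.not_lt.mpr (by omega)
      rw [if_neg hne]
      omega
  rw [hcount]
  have hslice : ∀ k ∈ List.range m,
      String.ofList (PySem.List.slice (nuseq.toList ++ List.replicate (PySem.Int.mod (-(nuseq.toList.length : Int)) 3).toNat '-') (some ((0 : Int) + 3 * (k : Int))) (some ((0 : Int) + 3 * (k : Int) + 3)))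
        = String.ofList (((pad3 nuseq.toList).drop (3 * k)).take 3) := by
    intro k _
    congr 1
    rw [show ((0 : Int) + 3 * (k : Int)) = ((3 * k : ℕ) : Int) by push_cast; ring]
    rw [show (((3 * k : ℕ) : Int) + 3) = ((3 * k : ℕ) : Int) + ((3 : ℕ) : Int) by norm_num]
    rw [PySem.List.slice_natCast_add]
    rfl
  rw [List.map_map]
  simp only [Function.comp_def]
  rw [List.map_congr_left hslice]
  rw [show (fun k => String.ofList (((pad3 nuseq.toList).drop (3 * k)).take 3))
        = (String.ofList ∘ fun k => ((pad3 nuseq.toList).drop (3 * k)).take 3) from rfl,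
      ← List.map_map, chunks_pad3, List.map_map, List.filter_map]
  congr 1
  apply List.filter_congr
  intro t _
  have hiff : (String.ofList (toC3 t) = ("---" : String)) ↔ (t = ('-', '-', '-')) := by
    rw [show ("---" : String) = String.ofList ['-', '-', '-'] from rfl, String.ofList_inj,
      toC3_eq_dashes_iff]
  simp [hiff]

-- ---- B side: the run loop ----
def padTake (r : List Char) (T : List (Char × Char × Char)) : List (Char × Char × Char) :=
  T.take r.length ++ List.replicate (r.length - T.length) ('-', '-', '-')

def gWalk : List (List Char) → List (Char × Char × Char) → List (List Char)
  | [], _ => []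
  | r :: rs, T => (padTake r T).flatMap toC3 :: gWalk rs (T.drop r.length)

lemma joinNil_eq_flatten (parts : List (List Char)) :
    PySem.Chars.join [] parts = parts.flatten := by
  induction parts with
  | nil => rfl
  | cons a parts ih =>
    cases parts with
    | nil => simp [PySem.Chars.join_singleton]
    | cons b rest =>
      rw [PySem.Chars.join_cons_cons, ih]
      simp

lemma strJoinNil (blocks : List (List Char)) :
    PySem.Str.join "" (blocks.map String.ofList) = String.ofList blocks.flatten := by
  unfold PySem.Str.join
  congr 1
  rw [show ("" : String).toList = ([] : List Char) from rfl]
  rw [List.map_map]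
  simp only [Function.comp_def, String.toList_ofList]
  simpa using joinNil_eq_flatten blocks

lemma pvRunLoop_eq_gWalk (runs : List (List Char)) (T : List (Char × Char × Char)) (p : ℕ) :
    pvRunLoop runs (T.map (fun t => String.ofList (toC3 t))) ((p : ℕ) : Int)
      = (gWalk runs (T.drop p)).map String.ofList := by
  induction runs generalizing p with
  | nil => rfl
  | cons r rs ih =>
    simp only [pvRunLoop, gWalk, List.map_cons]
    have hslice : PySem.List.slice (T.map (fun t => String.ofList (toC3 t))) (some (p : Int))
        (some ((p : Int) + (r.length : Int)))
        = ((T.drop p).take r.length).map (fun t => String.ofList (toC3 t)) := by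
      rw [PySem.List.slice_natCast_add]
      simp [List.map_take, List.map_drop]
    have hcnt : (((r.length : ℕ) : Int) - (((((T.drop p).take r.length).map (fun t => String.ofList (toC3 t))).length : ℕ) : Int)).toNat
        = r.length - (T.drop p).length := by
      simp only [List.length_map, List.length_take]
      omega
    have hchunk2 : (((T.drop p).take r.length).map (fun t => String.ofList (toC3 t)))
        ++ List.replicate (r.length - (T.drop p).length) "---"
        = ((padTake r (T.drop p)).map toC3).map String.ofList := by
      simp only [padTake, List.map_append, List.map_map, List.map_replicate]
      rfl
    refine congrArg₂ List.cons ?_ ?_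
    · rw [hslice, hcnt, hchunk2, strJoinNil]
      simp [List.flatMap]
    · rw [show ((p : Int) + (r.length : Int)) = (((p + r.length : ℕ) : ℕ) : Int) by push_cast; ring]
      rw [ih (p + r.length)]
      have hd : List.drop r.length (List.drop p T) = List.drop (p + r.length) T := by
        rw [List.drop_drop, Nat.add_comm]
      rw [hd]

lemma fWalk_dashfree (r : List Char) (hr : '-' ∉ r) (T : List (Char × Char × Char)) :
    fWalk r T = padTake r T := by
  induction r generalizing T with
  | nil => simp [fWalk, padTake]
  | cons c cs ih =>
    have hc : c ≠ '-' := fun h => hr (h ▸ List.mem_cons_self ..)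
    have hcs : '-' ∉ cs := fun h => hr (List.mem_cons_of_mem _ h)
    cases T with
    | nil =>
      simp only [fWalk, if_neg hc, List.headD_nil, List.tail_nil, fWalk_nil]
      simp [padTake, List.replicate_succ]
    | cons t ts =>
      simp only [fWalk, if_neg hc, List.headD_cons, List.tail_cons, ih hcs]
      simp [padTake]

lemma fWalk_append_dash (r : List Char) (hr : '-' ∉ r) (rest : List Char)
    (T : List (Char × Char × Char)) :
    fWalk (r ++ '-' :: rest) T
      = padTake r T ++ ('-', '-', '-') :: fWalk rest (T.drop r.length) := by
  induction r generalizing T with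
  | nil => simp [fWalk, padTake]
  | cons c cs ih =>
    have hc : c ≠ '-' := fun h => hr (h ▸ List.mem_cons_self ..)
    have hcs : '-' ∉ cs := fun h => hr (List.mem_cons_of_mem _ h)
    cases T with
    | nil =>
      simp only [List.cons_append, fWalk, if_neg hc, List.headD_nil, List.tail_nil, ih hcs]
      simp [padTake, List.replicate_succ]
    | cons t ts =>
      simp only [List.cons_append, fWalk, if_neg hc, List.headD_cons, List.tail_cons, ih hcs]
      simp [padTake]

lemma join_gWalk (runs : List (List Char)) (hr : ∀ r ∈ runs, '-' ∉ r)
    (T : List (Char × Char × Char)) :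
    PySem.Chars.join ['-', '-', '-'] (gWalk runs T)
      = (fWalk (List.intercalate ['-'] runs) T).flatMap toC3 := by
  induction runs generalizing T with
  | nil => simp [gWalk, List.intercalate, fWalk]
  | cons r rs ih =>
    cases rs with
    | nil =>
      simp only [gWalk, PySem.Chars.join_singleton]
      rw [show List.intercalate ['-'] [r] = r by simp [List.intercalate]]
      rw [fWalk_dashfree r (hr r (List.mem_cons_self ..)) T]
    | cons r2 rs2 =>
      rw [show List.intercalate ['-'] (r :: r2 :: rs2)
            = r ++ '-' :: List.intercalate ['-'] (r2 :: rs2) from intercalate_cons_cons r r2 rs2]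
      rw [fWalk_append_dash r (hr r (List.mem_cons_self ..)) _ T]
      have ihx := ih (fun x hx => hr x (List.mem_cons_of_mem _ hx)) (T.drop r.length)
      simp only [gWalk] at ihx ⊢
      rw [PySem.Chars.join_cons_cons, ihx]
      simp [toC3]

lemma strJoinDashes (blocks : List (List Char)) :
    PySem.Str.join "---" (blocks.map String.ofList)
      = String.ofList (PySem.Chars.join ['-', '-', '-'] blocks) := by
  unfold PySem.Str.join
  congr 1
  rw [List.map_map]
  simp [Function.comp_def]

-- ===== VERDICT (by name: the statement is the Claim_ definition above) =====
theorem nuseq_realign_spec : Claim_equal_nuseq_realign := by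
  intro nuseq aaseq _
  unfold Spec_nuseq_realign nuseq_realign nuseq_realign_alt
  simp only []
  rw [splitOn_eq_pvSplitDash, pvCodons_eq]
  rw [show (0 : Int) = ((0 : ℕ) : Int) from rfl]
  rw [pvRunLoop_eq_gWalk (pvSplitDash aaseq.toList) (pvTriples nuseq) 0, List.drop_zero]
  rw [strJoinDashes, join_gWalk _ (dash_not_mem_pvSplitDash aaseq.toList) _,
    intercalate_pvSplitDash]
  rw [scatter_eq_fWalk]
  rfl
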